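-- pv_equiv track=rewrite | github.com/chris-arsenault/advent-of-code-2025 | day8/main.py | part2
-- ===== SOURCE A (Python) =====
-- class DSU:
--     def __init__(self, n: int) -> None:
--         self.parent = list(range(n))
--         self.size = [1] * n
--         self.components = n
--
--     def find(self, x: int) -> int:
--         while self.parent[x] != x:
--             self.parent[x] = self.parent[self.parent[x]]
--             x = self.parent[x]
--         return x
--
--     def union(self, a: int, b: int) -> bool:
--         ra, rb = self.find(a), self.find(b)
--         if ra == rb:
--             return False
--         if self.size[ra] < self.size[rb]:
--             ra, rb = rb, ra
--         self.parent[rb] = ra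
--         self.size[ra] += self.size[rb]
--         self.components -= 1
--         return True
--
-- def part2(points: list[tuple[int, int, int]], edges: list[tuple[int, int, int]]) -> int:
--     n = len(points)
--     dsu = DSU(n)
--     last_prod = 0
--     for _, a, b in edges:
--         if dsu.union(a, b):
--             last_prod = points[a][0] * points[b][0]
--             if dsu.components == 1:
--                 break
--     return last_prod
-- ===== SOURCE B (Python) =====
-- def part2(points, edges):
--     n = len(points)
--     labels = list(range(n))
--     count = n
--     last_prod = 0
--     for _, a, b in edges:
--         la, lb = labels[a], labels[b]
--         if la != lb:
--             labels = [la if v == lb else v for v in labels]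
--             count -= 1
--             last_prod = points[a][0] * points[b][0]
--             if count == 1:
--                 break
--     return last_prod
-- ===== Notes on version B (the rewrite author's own statement) =====
-- stated objective: alternative
-- what changed: Replaces the size-balanced, path-halving union-find (parent/size arrays, iterative find loops) by a quick-find scheme: one component-label array and a live component count; union is a direct label comparison plus a single relabeling scan, with no find loop and no size array.
-- outside the precondition, e.g. on part2([(1, 2, 3), (4, 5, 6)], [(0, 0, 1), (0, 5, 5)]): A returns 4, B returns 4
import Mathlib
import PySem

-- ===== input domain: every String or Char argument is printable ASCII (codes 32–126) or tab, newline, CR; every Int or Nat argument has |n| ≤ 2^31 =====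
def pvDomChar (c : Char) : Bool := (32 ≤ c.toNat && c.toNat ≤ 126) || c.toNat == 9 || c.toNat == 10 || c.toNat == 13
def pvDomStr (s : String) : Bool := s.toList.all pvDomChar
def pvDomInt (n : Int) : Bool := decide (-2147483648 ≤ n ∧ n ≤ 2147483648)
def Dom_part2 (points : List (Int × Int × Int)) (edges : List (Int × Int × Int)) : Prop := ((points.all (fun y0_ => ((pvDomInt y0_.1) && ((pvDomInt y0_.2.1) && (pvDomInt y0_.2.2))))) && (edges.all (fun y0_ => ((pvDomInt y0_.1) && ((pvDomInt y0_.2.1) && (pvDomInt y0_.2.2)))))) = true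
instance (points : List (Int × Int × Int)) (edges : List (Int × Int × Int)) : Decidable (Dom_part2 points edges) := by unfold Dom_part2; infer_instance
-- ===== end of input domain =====

-- B replaces the size-balanced, path-halving union-find of A by a quick-find scheme
-- (one component-label array, union = one relabeling scan); alternative data structure, not faster.


-- ===== PORT A =====
-- DSU.find: `while self.parent[x] != x: self.parent[x] = self.parent[self.parent[x]]; x = self.parent[x]`.
-- The fuel argument only makes the while-loop total; it is always sufficient on inputs
-- satisfying Pre_part2 (proved below), where list accesses are in range (pyGetD defaults unreachable).
def dsuFindLoop : Nat → List Int → Int → List Int × Int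
  | 0, parent, x => (parent, x)
  | fuel+1, parent, x =>
    let px := PySem.List.pyGetD parent x 0
    if px ≠ x then
      let p1 := PySem.List.pySetD parent x (PySem.List.pyGetD parent px 0)
      dsuFindLoop fuel p1 (PySem.List.pyGetD p1 x 0)
    else (parent, x)

-- DSU.union
def dsuUnion (parent size : List Int) (comps a b : Int) : List Int × List Int × Int × Bool :=
  let r1 := dsuFindLoop (2 ^ parent.length) parent a
  let r2 := dsuFindLoop (2 ^ r1.1.length) r1.1 b
  let ra := r1.2
  let rb := r2.2
  if ra = rb then (r2.1, size, comps, false)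
  else
    let pr := if PySem.List.pyGetD size ra 0 < PySem.List.pyGetD size rb 0 then (rb, ra) else (ra, rb)
    let p3 := PySem.List.pySetD r2.1 pr.2 pr.1
    let s3 := PySem.List.pySetD size pr.1 (PySem.List.pyGetD size pr.1 0 + PySem.List.pyGetD size pr.2 0)
    (p3, s3, comps - 1, true)

-- the `for _, a, b in edges:` loop of part2 (early `break` = returning the value directly)
def part2Loop (points : List (Int × Int × Int)) : List (Int × Int × Int) → List Int → List Int → Int → Int → Int
  | [], _parent, _size, _comps, last => last
  | e :: rest, parent, size, comps, last =>
    let u := dsuUnion parent size comps e.2.1 e.2.2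
    if u.2.2.2 then
      let last' := (PySem.List.pyGetD points e.2.1 (0,0,0)).1 * (PySem.List.pyGetD points e.2.2 (0,0,0)).1
      if u.2.2.1 = 1 then last' else part2Loop points rest u.1 u.2.1 u.2.2.1 last'
    else
      part2Loop points rest u.1 u.2.1 u.2.2.1 last

def part2 (points : List (Int × Int × Int)) (edges : List (Int × Int × Int)) : Int :=
  let n := points.length
  part2Loop points edges ((List.range n).map (fun k : Nat => (k : Int))) (List.replicate n 1) (n : Int) 0

-- ===== PORT B =====
-- quick-find: labels[i] = component label of node i; union relabels one component in a single scan
def part2AltLoop (points : List (Int × Int × Int)) : List (Int × Int × Int) → List Int → Int → Int → Int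
  | [], _labels, _count, last => last
  | e :: rest, labels, count, last =>
    let la := PySem.List.pyGetD labels e.2.1 0
    let lb := PySem.List.pyGetD labels e.2.2 0
    if la ≠ lb then
      let labels' := labels.map (fun v => if v = lb then la else v)
      let count' := count - 1
      let last' := (PySem.List.pyGetD points e.2.1 (0,0,0)).1 * (PySem.List.pyGetD points e.2.2 (0,0,0)).1
      if count' = 1 then last' else part2AltLoop points rest labels' count' last'
    else part2AltLoop points rest labels count last

def part2_alt (points : List (Int × Int × Int)) (edges : List (Int × Int × Int)) : Int :=
  part2AltLoop points edges ((List.range points.length).map (fun k : Nat => (k : Int))) (points.length : Int) 0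

-- ===== PRECONDITION & SPEC =====
-- Pre_part2: every edge endpoint is a valid Python index into points (A raises IndexError otherwise).
-- Slight narrowing: A breaks out of its loop as soon as one component remains, so it can also return
-- on inputs whose LATER edges have invalid endpoints; Pre_part2 requires all edges to be valid
-- (B returns the same value on such inputs, see the cite in the claim).
def Pre_part2 (points : List (Int × Int × Int)) (edges : List (Int × Int × Int)) : Prop :=
  ∀ e ∈ edges, PySem.Raise.InRange points.length e.2.1 ∧ PySem.Raise.InRange points.length e.2.2
instance (points : List (Int × Int × Int)) (edges : List (Int × Int × Int)) : Decidable (Pre_part2 points edges) := by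
  unfold Pre_part2 PySem.Raise.InRange; infer_instance

def pvWitness_part2 : (List (Int × Int × Int)) × (List (Int × Int × Int)) :=
  ([(1,2,3),(4,5,6),(7,8,9)], [(0,0,1),(5,1,2)])

def Spec_part2 (points : List (Int × Int × Int)) (edges : List (Int × Int × Int)) (out : Int) : Prop := out = part2_alt points edges
instance (points : List (Int × Int × Int)) (edges : List (Int × Int × Int)) (out : Int) : Decidable (Spec_part2 points edges out) := by unfold Spec_part2; infer_instance

-- ===== CLAIM (what is proved, stated in full; the proofs are below) =====
def Claim_equal_part2 : Prop := ∀ (points : List (Int × Int × Int)) (edges : List (Int × Int × Int)), Dom_part2 points edges → Pre_part2 points edges → Spec_part2 points edges (part2 points edges)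

-- ===== LEMMAS AND PROOFS =====

-- Python index normalisation: a valid index i into a list of length n denotes position normN n i
def normN (n : Nat) (i : Int) : Int := if i < 0 then i + n else i

def InR (n : Nat) (i : Int) : Prop := 0 ≤ i ∧ i < n

-- the parent (resp. label) array as a function on indices
def fOf (l : List Int) : Int → Int := fun i => PySem.List.pyGetD l i 0

-- parent forest certificate: hgt strictly decreases along non-root parent edges, stays in range
def Forest (n : Nat) (f : Int → Int) (hgt : Int → Nat) : Prop :=
  ∀ i, InR n i → (InR n (f i) ∧ (f i = i ∨ hgt (f i) < hgt i))

-- root computation by iterating the parent function (fuel-indexed)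
def rootIter : Nat → (Int → Int) → Int → Int
  | 0, _, x => x
  | k+1, f, x => if f x = x then x else rootIter k f (f x)

def rootN (n : Nat) (f : Int → Int) (i : Int) : Int := rootIter (2 ^ n) f i

def rngL (n : Nat) : List Int := (List.range n).map (fun k : Nat => (k : Int))

def nrootsF (n : Nat) (f : Int → Int) : Nat := (rngL n).countP (fun j => f j == j)

-- height bound: doubles with every performed union (n - nrootsF counts performed unions)
def Bnd (n : Nat) (f : Int → Int) (hgt : Int → Nat) : Prop :=
  ∀ i, InR n i → hgt i < 2 ^ (n - nrootsF n f)

-- the simulation relation between A's root partition and B's label partition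
def MatchP (n : Nat) (f L : Int → Int) : Prop :=
  ∀ i j, InR n i → InR n j → (L i = L j ↔ rootN n f i = rootN n f j)

-- ---- list-access bridges ----

lemma pyGetD_neg' {α : Type} (xs : List α) (i : Int) (d : α) (h0 : -(xs.length : Int) ≤ i) (h1 : i < 0) :
    PySem.List.pyGetD xs i d = PySem.List.pyGetD xs (i + xs.length) d := by
  have e1 : PySem.List.pyIdx? xs.length i = some ((i + xs.length).toNat) := by
    simp only [PySem.List.pyIdx?]
    split_ifs with h h2 <;> first | omega | (congr 1; omega)
  have e2 : PySem.List.pyIdx? xs.length (i + xs.length) = some ((i + xs.length).toNat) := by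
    simp only [PySem.List.pyIdx?]
    split_ifs with h h2 <;> first | rfl | omega
  simp only [PySem.List.pyGetD, PySem.List.pyGet?, e1, e2]

lemma pySetD_neg' {α : Type} (xs : List α) (i : Int) (v : α) (h0 : -(xs.length : Int) ≤ i) (h1 : i < 0) :
    PySem.List.pySetD xs i v = PySem.List.pySetD xs (i + xs.length) v := by
  have e1 : PySem.List.pyIdx? xs.length i = some ((i + xs.length).toNat) := by
    simp only [PySem.List.pyIdx?]
    split_ifs with h h2 <;> first | omega | (congr 1; omega)
  have e2 : PySem.List.pyIdx? xs.length (i + xs.length) = some ((i + xs.length).toNat) := by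
    simp only [PySem.List.pyIdx?]
    split_ifs with h h2 <;> first | rfl | omega
  simp only [PySem.List.pySetD, PySem.List.pySet?, e1, e2]

lemma get_set (xs : List Int) (i j v : Int) (hi0 : 0 ≤ i) (_hi1 : i < xs.length) (hj0 : 0 ≤ j) (hj1 : j < xs.length) :
    PySem.List.pyGetD (PySem.List.pySetD xs i v) j 0 = if j = i then v else PySem.List.pyGetD xs j 0 := by
  rw [PySem.List.pySetD_of_nonneg xs v hi0]
  rw [PySem.List.pyGetD_eq_getElem _ _ hj0 (by simpa using hj1)]
  rw [PySem.List.pyGetD_eq_getElem _ _ hj0 hj1]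
  rw [List.getElem_set]
  have : i.toNat = j.toNat ↔ j = i := by omega
  split_ifs with h1 h2 h2 <;> first | rfl | (exfalso; omega)

lemma fOf_rngL (n : Nat) (i : Int) (h : InR n i) : fOf (rngL n) i = i := by
  obtain ⟨h0, h1⟩ := h
  have hlen : (rngL n).length = n := by simp [rngL]
  rw [fOf, PySem.List.pyGetD_eq_getElem _ _ h0 (by rw [hlen]; exact h1)]
  unfold rngL
  rw [List.getElem_map, List.getElem_range]
  omega

-- ---- rootIter infrastructure ----

lemma ri_fixed (K : Nat) (f : Int → Int) (r : Int) (h : f r = r) : rootIter K f r = r := by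
  induction K with
  | zero => rfl
  | succ k _ => simp [rootIter, h]

lemma ri_spec (n : Nat) (f : Int → Int) (hgt : Int → Nat) (hF : Forest n f hgt) :
    ∀ (K : Nat) (i : Int), InR n i → hgt i < K →
      f (rootIter K f i) = rootIter K f i ∧ InR n (rootIter K f i) := by
  intro K
  induction K with
  | zero => intro i _ h; omega
  | succ k ih =>
    intro i hi hlt
    by_cases hfix : f i = i
    · have hri : rootIter (k+1) f i = i := by simp [rootIter, hfix]
      rw [hri]; exact ⟨hfix, hi⟩
    · obtain ⟨hin, hdec⟩ := hF i hi
      rcases hdec with h | h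
      · exact absurd h hfix
      · simp only [rootIter, if_neg hfix]
        exact ih (f i) hin (by omega)

lemma ri_stable (n : Nat) (f : Int → Int) (hgt : Int → Nat) (hF : Forest n f hgt) :
    ∀ (K K' : Nat) (i : Int), InR n i → hgt i < K → hgt i < K' →
      rootIter K f i = rootIter K' f i := by
  intro K
  induction K with
  | zero => intro K' i _ h; omega
  | succ k ih =>
    intro K' i hi hlt hlt'
    cases K' with
    | zero => omega
    | succ k' =>
      by_cases hfix : f i = i
      · simp [rootIter, hfix]
      · obtain ⟨hin, hdec⟩ := hF i hi
        rcases hdec with h | h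
        · exact absurd h hfix
        · simp only [rootIter, if_neg hfix]
          exact ih k' (f i) hin (by omega) (by omega)

lemma root_step (n : Nat) (f : Int → Int) (hgt : Int → Nat) (hF : Forest n f hgt)
    (hG : ∀ j, InR n j → hgt j < 2 ^ n) (i : Int) (hi : InR n i) :
    rootN n f i = rootN n f (f i) := by
  by_cases hfix : f i = i
  · rw [hfix]
  · obtain ⟨hin, hdec⟩ := hF i hi
    rcases hdec with h | h
    · exact absurd h hfix
    · have hpos : 0 < 2 ^ n := Nat.two_pow_pos n
      obtain ⟨M, hM⟩ : ∃ M, 2 ^ n = M + 1 := ⟨2 ^ n - 1, by omega⟩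
      have h1 : rootN n f i = rootIter M f (f i) := by
        rw [rootN, hM]; simp only [rootIter, if_neg hfix]
      rw [h1, rootN]
      exact ri_stable n f hgt hF M (2 ^ n) (f i) hin (by have := hG i hi; omega) (hG (f i) hin)

lemma root_fixed_self (n : Nat) (f : Int → Int) (hgt : Int → Nat) (hF : Forest n f hgt)
    (hG : ∀ j, InR n j → hgt j < 2 ^ n) (i : Int) (hi : InR n i) :
    f (rootN n f i) = rootN n f i ∧ InR n (rootN n f i) := by
  exact ri_spec n f hgt hF (2 ^ n) i hi (hG i hi)

-- ---- path-halving update ----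

lemma hgt_ffx (n : Nat) (f : Int → Int) (hgt : Int → Nat) (x : Int)
    (hF : Forest n f hgt) (hx : InR n x) (hnr : f x ≠ x) : hgt (f (f x)) < hgt x := by
  obtain ⟨hin, hdec⟩ := hF x hx
  rcases hdec with h | h
  · exact absurd h hnr
  · obtain ⟨hin2, hdec2⟩ := hF (f x) hin
    rcases hdec2 with h2 | h2
    · rw [h2]; exact h
    · omega

lemma forest_halve (n : Nat) (f f' : Int → Int) (hgt : Int → Nat) (x : Int)
    (hF : Forest n f hgt) (hx : InR n x) (hnr : f x ≠ x)
    (H : ∀ j, InR n j → f' j = if j = x then f (f x) else f j) :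
    Forest n f' hgt := by
  intro j hj
  rw [H j hj]
  by_cases hjx : j = x
  · subst hjx
    rw [if_pos rfl]
    obtain ⟨hin, _⟩ := hF j hj
    obtain ⟨hin2, _⟩ := hF (f j) hin
    exact ⟨hin2, Or.inr (hgt_ffx n f hgt j hF hj hnr)⟩
  · rw [if_neg hjx]; exact hF j hj

lemma fix_halve (n : Nat) (f f' : Int → Int) (hgt : Int → Nat) (x : Int)
    (hF : Forest n f hgt) (hx : InR n x) (hnr : f x ≠ x)
    (H : ∀ j, InR n j → f' j = if j = x then f (f x) else f j) :
    ∀ j, InR n j → (f' j = j ↔ f j = j) := by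
  intro j hj
  rw [H j hj]
  by_cases hjx : j = x
  · subst hjx
    rw [if_pos rfl]
    have hlt := hgt_ffx n f hgt j hF hj hnr
    constructor
    · intro h; exfalso; rw [h] at hlt; omega
    · intro h; exact absurd h hnr
  · rw [if_neg hjx]

lemma root_halve (n : Nat) (f f' : Int → Int) (hgt : Int → Nat) (x : Int)
    (hF : Forest n f hgt) (hx : InR n x) (hnr : f x ≠ x)
    (H : ∀ j, InR n j → f' j = if j = x then f (f x) else f j)
    (hG : ∀ j, InR n j → hgt j < 2 ^ n) :
    ∀ j, InR n j → rootN n f' j = rootN n f j := by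
  have hF' : Forest n f' hgt := forest_halve n f f' hgt x hF hx hnr H
  suffices haux : ∀ (K : Nat) (j : Int), InR n j → hgt j < K → rootN n f' j = rootN n f j by
    intro j hj; exact haux (hgt j + 1) j hj (by omega)
  intro K
  induction K with
  | zero => intro j _ h; omega
  | succ k ih =>
    intro j hj hlt
    by_cases hfix : f' j = j
    · have hfj : f j = j := (fix_halve n f f' hgt x hF hx hnr H j hj).mp hfix
      rw [rootN, ri_fixed _ _ _ hfix, rootN, ri_fixed _ _ _ hfj]
    · have h1 : rootN n f' j = rootN n f' (f' j) := root_step n f' hgt hF' hG j hj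
      obtain ⟨hin', hdec'⟩ := hF' j hj
      have hd : hgt (f' j) < hgt j := by
        rcases hdec' with h | h
        · exact absurd h hfix
        · exact h
      rw [h1, ih (f' j) hin' (by omega)]
      by_cases hjx : j = x
      · subst hjx
        rw [H j hj, if_pos rfl]
        have s1 : rootN n f j = rootN n f (f j) := root_step n f hgt hF hG j hj
        obtain ⟨hin2, _⟩ := hF j hj
        have s2 : rootN n f (f j) = rootN n f (f (f j)) := root_step n f hgt hF hG (f j) hin2
        rw [s1, s2]
      · rw [H j hj, if_neg hjx]
        exact (root_step n f hgt hF hG j hj).symm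

-- ---- union (root re-linking) update ----

lemma forest_union (n : Nat) (f f' : Int → Int) (hgt : Int → Nat) (ra rb : Int)
    (hF : Forest n f hgt) (hG : ∀ j, InR n j → hgt j < 2 ^ n)
    (hra : InR n ra) (_hrb : InR n rb) (hfra : f ra = ra) (hfrb : f rb = rb) (hne : ra ≠ rb)
    (H : ∀ j, InR n j → f' j = if j = rb then ra else f j) :
    Forest n f' (fun j => if rootN n f j = rb then hgt j + hgt ra + 1 else hgt j) := by
  intro j hj
  rw [H j hj]
  by_cases hjrb : j = rb
  · rw [if_pos hjrb]
    refine ⟨hra, Or.inr ?_⟩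
    have e1 : rootN n f ra = ra := ri_fixed _ _ _ hfra
    have e2 : rootN n f j = rb := by rw [hjrb]; exact ri_fixed _ _ _ hfrb
    show (if rootN n f ra = rb then hgt ra + hgt ra + 1 else hgt ra) <
      (if rootN n f j = rb then hgt j + hgt ra + 1 else hgt j)
    rw [e1, e2, if_neg hne, if_pos rfl]
    omega
  · rw [if_neg hjrb]
    obtain ⟨hin, hdec⟩ := hF j hj
    refine ⟨hin, ?_⟩
    rcases hdec with h | h
    · exact Or.inl h
    · refine Or.inr ?_
      have hr : rootN n f (f j) = rootN n f j := (root_step n f hgt hF hG j hj).symm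
      show (if rootN n f (f j) = rb then hgt (f j) + hgt ra + 1 else hgt (f j)) <
        (if rootN n f j = rb then hgt j + hgt ra + 1 else hgt j)
      rw [hr]
      split_ifs <;> omega

lemma root_union (n : Nat) (f f' : Int → Int) (hgt : Int → Nat) (ra rb : Int)
    (hF : Forest n f hgt) (hG : ∀ j, InR n j → hgt j < 2 ^ n)
    (hra : InR n ra) (hrb : InR n rb) (hfra : f ra = ra) (hfrb : f rb = rb) (hne : ra ≠ rb)
    (H : ∀ j, InR n j → f' j = if j = rb then ra else f j)
    (hG' : ∀ j, InR n j → (if rootN n f j = rb then hgt j + hgt ra + 1 else hgt j) < 2 ^ n) :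
    ∀ j, InR n j → rootN n f' j = if rootN n f j = rb then ra else rootN n f j := by
  have hF' := forest_union n f f' hgt ra rb hF hG hra hrb hfra hfrb hne H
  set hgt' : Int → Nat := fun j => if rootN n f j = rb then hgt j + hgt ra + 1 else hgt j with hhgt'
  suffices haux : ∀ (K : Nat) (j : Int), InR n j → hgt' j < K →
      rootN n f' j = if rootN n f j = rb then ra else rootN n f j by
    intro j hj; exact haux (hgt' j + 1) j hj (by omega)
  intro K
  induction K with
  | zero => intro j _ h; omega
  | succ k ih =>
    intro j hj hlt
    by_cases hfix : f' j = j
    · have hjrb : j ≠ rb := by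
        intro h; subst h
        rw [H j hj, if_pos rfl] at hfix; exact hne hfix
      have hfj : f j = j := by rw [H j hj, if_neg hjrb] at hfix; exact hfix
      rw [rootN, ri_fixed _ _ _ hfix]
      rw [show rootN n f j = j from ri_fixed _ _ _ hfj]
      rw [if_neg hjrb]
    · have h1 : rootN n f' j = rootN n f' (f' j) := root_step n f' hgt' hF' hG' j hj
      obtain ⟨hin', hdec'⟩ := hF' j hj
      have hd : hgt' (f' j) < hgt' j := by
        rcases hdec' with h | h
        · exact absurd h hfix
        · exact h
      rw [h1, ih (f' j) hin' (by omega)]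
      by_cases hjrb : j = rb
      · subst hjrb
        rw [H j hj, if_pos rfl]
        rw [show rootN n f ra = ra from ri_fixed _ _ _ hfra]
        rw [show rootN n f j = j from ri_fixed _ _ _ hfrb]
        rw [if_neg hne, if_pos rfl]
      · rw [H j hj, if_neg hjrb]
        rw [show rootN n f (f j) = rootN n f j from (root_step n f hgt hF hG j hj).symm]

lemma fix_union (n : Nat) (f f' : Int → Int) (ra rb : Int)
    (hfrb : f rb = rb) (hne : ra ≠ rb)
    (H : ∀ j, InR n j → f' j = if j = rb then ra else f j) :
    ∀ j, InR n j → (f' j = j ↔ (f j = j ∧ j ≠ rb)) := by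
  intro j hj
  rw [H j hj]
  by_cases hjrb : j = rb
  · subst hjrb
    rw [if_pos rfl]
    constructor
    · intro h; exact absurd h hne
    · intro h; exact absurd rfl h.2
  · rw [if_neg hjrb]
    constructor
    · intro h; exact ⟨h, hjrb⟩
    · intro h; exact h.1

-- ---- root counting ----

lemma countP_update (l : List Int) (p q : Int → Bool) (x : Int) (hx : x ∈ l) (hnd : l.Nodup)
    (hpx : p x = true) (hqx : q x = false) (hagree : ∀ y ∈ l, y ≠ x → p y = q y) :
    l.countP p = l.countP q + 1 := by
  induction l with
  | nil => cases hx
  | cons y ys ih =>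
    rcases List.mem_cons.mp hx with h | h
    · subst h
      rw [List.countP_cons, List.countP_cons, hpx, hqx]
      simp only [if_true, Bool.false_eq_true, if_false]
      have : ys.countP p = ys.countP q := by
        apply List.countP_congr
        intro z hz
        have hzx : z ≠ x := by
          intro h; subst h; exact (List.nodup_cons.mp hnd).1 hz
        rw [hagree z (List.mem_cons_of_mem _ hz) hzx]
      omega
    · have hyx : y ≠ x := by
        intro hh; subst hh; exact (List.nodup_cons.mp hnd).1 h
      rw [List.countP_cons, List.countP_cons, hagree y List.mem_cons_self hyx]
      have := ih h (List.nodup_cons.mp hnd).2 (fun z hz hzx => hagree z (List.mem_cons_of_mem _ hz) hzx)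
      omega

lemma mem_rngL (n : Nat) (j : Int) : j ∈ rngL n ↔ InR n j := by
  unfold rngL InR
  constructor
  · intro h
    obtain ⟨k, hk, rfl⟩ := List.mem_map.mp h
    have := List.mem_range.mp hk
    omega
  · intro ⟨h0, h1⟩
    refine List.mem_map.mpr ⟨j.toNat, List.mem_range.mpr (by omega), by omega⟩

lemma nroots_congr (n : Nat) (f f' : Int → Int) (h : ∀ j, InR n j → (f' j = j ↔ f j = j)) :
    nrootsF n f' = nrootsF n f := by
  apply List.countP_congr
  intro j hj
  have hjr : InR n j := (mem_rngL n j).mp hj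
  simpa using h j hjr

lemma nroots_le (n : Nat) (f : Int → Int) : nrootsF n f ≤ n := by
  have := List.countP_le_length (p := fun j => f j == j) (l := rngL n)
  unfold nrootsF
  simpa [rngL] using this

lemma nroots_pos (n : Nat) (f : Int → Int) (hgt : Int → Nat) (hF : Forest n f hgt) (hn : 1 ≤ n) :
    1 ≤ nrootsF n f := by
  have h0 : InR n 0 := ⟨le_refl _, by exact_mod_cast hn⟩
  obtain ⟨hfix, hin⟩ := ri_spec n f hgt hF (hgt 0 + 1) 0 h0 (by omega)
  apply List.countP_pos_iff.mpr
  exact ⟨rootIter (hgt 0 + 1) f 0, (mem_rngL n _).mpr hin, by simpa using hfix⟩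

lemma bnd_global (n : Nat) (f : Int → Int) (hgt : Int → Nat) (hF : Forest n f hgt)
    (hB : Bnd n f hgt) (hn : 1 ≤ n) : ∀ j, InR n j → hgt j < 2 ^ n := by
  intro j hj
  have h1 := hB j hj
  have h2 := nroots_pos n f hgt hF hn
  have h3 : n - nrootsF n f < n := by omega
  calc hgt j < 2 ^ (n - nrootsF n f) := h1
    _ ≤ 2 ^ n := Nat.pow_le_pow_right (by norm_num) (by omega)

-- ---- find loop specification ----

lemma normN_nonneg (n : Nat) (i : Int) (h : 0 ≤ i) : normN n i = i := by
  unfold normN; rw [if_neg (not_lt.mpr h)]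

lemma findLoop_step_root (fl : Nat) (parent : List Int) (x : Int)
    (h : PySem.List.pyGetD parent x 0 = x) : dsuFindLoop (fl+1) parent x = (parent, x) := by
  simp [dsuFindLoop, h]

lemma findLoop_step (fl : Nat) (parent : List Int) (x : Int)
    (h : PySem.List.pyGetD parent x 0 ≠ x) :
    dsuFindLoop (fl+1) parent x =
      dsuFindLoop fl (PySem.List.pySetD parent x (PySem.List.pyGetD parent (PySem.List.pyGetD parent x 0) 0))
        (PySem.List.pyGetD (PySem.List.pySetD parent x (PySem.List.pyGetD parent (PySem.List.pyGetD parent x 0) 0)) x 0) := by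
  simp [dsuFindLoop, h]

lemma findLoop_spec (n : Nat) (hgt : Int → Nat) :
    ∀ (fuel : Nat) (parent : List Int) (x : Int),
      parent.length = n → Forest n (fOf parent) hgt → (∀ j, InR n j → hgt j < 2 ^ n) →
      PySem.Raise.InRange n x → hgt (normN n x) + 2 ≤ fuel →
      ∃ parent', dsuFindLoop fuel parent x = (parent', rootN n (fOf parent) (normN n x))
        ∧ parent'.length = n ∧ Forest n (fOf parent') hgt
        ∧ (∀ j, InR n j → (fOf parent' j = j ↔ fOf parent j = j))
        ∧ (∀ j, InR n j → rootN n (fOf parent') j = rootN n (fOf parent) j) := by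
  intro fuel
  induction fuel with
  | zero => intro parent x _ _ _ _ hf; omega
  | succ fl ih =>
    intro parent x hlen hF hG hx hfuel
    obtain ⟨hx0, hx1⟩ := hx
    have hn : 1 ≤ n := by omega
    set na := normN n x with hna
    have hnaR : InR n na := by
      rw [hna]; unfold normN; split_ifs <;> exact ⟨by omega, by omega⟩
    have hpx : PySem.List.pyGetD parent x 0 = fOf parent na := by
      rw [hna]; unfold normN fOf
      split_ifs with h
      · rw [pyGetD_neg' parent x 0 (by rw [hlen]; exact_mod_cast hx0) h, hlen]
      · rfl
    have hpxR : InR n (fOf parent na) := (hF na hnaR).1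
    by_cases hroot : fOf parent na = na
    · -- na is already a root
      have hrna : rootN n (fOf parent) na = na := ri_fixed _ _ _ hroot
      by_cases hneg : x < 0
      · -- one idle halving iteration (writes back the same value), then the root test succeeds
        have hpxne : PySem.List.pyGetD parent x 0 ≠ x := by
          rw [hpx, hroot]; intro h; rw [← h] at hneg; exact absurd hnaR.1 (not_le.mpr hneg)
        rw [findLoop_step fl parent x hpxne]
        have hxn : x + (n : Int) = na := by rw [hna]; unfold normN; rw [if_pos hneg]
        have h2 : PySem.List.pyGetD parent na 0 = na := hroot
        have hb : na.toNat < parent.length := by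
          obtain ⟨w1, w2⟩ := hnaR; rw [hlen]; omega
        have h3 : parent[na.toNat]'hb = na := by
          have h4 := hroot
          unfold fOf at h4
          rw [PySem.List.pyGetD_eq_getElem _ _ hnaR.1 (by rw [hlen]; exact_mod_cast hnaR.2)] at h4
          exact h4
        have hset : PySem.List.pySetD parent x (PySem.List.pyGetD parent (PySem.List.pyGetD parent x 0) 0) = parent := by
          rw [hpx, hroot, h2]
          rw [pySetD_neg' parent x na (by rw [hlen]; exact_mod_cast hx0) hneg]
          rw [hlen, hxn]
          rw [PySem.List.pySetD_of_nonneg _ _ hnaR.1]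
          have h5 := List.set_getElem_self hb
          rw [h3] at h5
          exact h5
        rw [hset]
        have hx1' : PySem.List.pyGetD parent x 0 = na := by rw [hpx, hroot]
        rw [hx1']
        obtain ⟨fl', rfl⟩ : ∃ fl', fl = fl' + 1 := ⟨fl - 1, by omega⟩
        rw [findLoop_step_root fl' parent na (by show PySem.List.pyGetD parent na 0 = na; exact hroot)]
        rw [hrna]
        exact ⟨parent, rfl, hlen, hF, fun j _ => Iff.rfl, fun j _ => rfl⟩
      · -- x is the (nonnegative) root itself: the loop test fails at once
        have hnax : na = x := by rw [hna]; exact normN_nonneg n x (by omega)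
        rw [findLoop_step_root fl parent x (by rw [hpx, hroot, hnax])]
        rw [hrna, hnax]
        exact ⟨parent, rfl, hlen, hF, fun j _ => Iff.rfl, fun j _ => rfl⟩
    · -- na is not a root: one halving step, then induction
      have hpxne : PySem.List.pyGetD parent x 0 ≠ x := by
        by_cases hneg : x < 0
        · rw [hpx]; intro h; rw [← h] at hneg; exact absurd hpxR.1 (not_le.mpr hneg)
        · rw [hpx, hna, normN_nonneg n x (by omega)]
          rw [hna, normN_nonneg n x (by omega)] at hroot
          exact hroot
      rw [findLoop_step fl parent x hpxne]
      set f := fOf parent with hf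
      set v := PySem.List.pyGetD parent (PySem.List.pyGetD parent x 0) 0 with hv
      have hvval : v = f (f na) := by rw [hv, hpx]; rfl
      set p1 := PySem.List.pySetD parent x v with hp1
      have hp1' : p1 = PySem.List.pySetD parent na v := by
        rw [hp1, hna]; unfold normN
        split_ifs with h
        · rw [pySetD_neg' parent x v (by rw [hlen]; exact_mod_cast hx0) h, hlen]
        · rfl
      have hlen1 : p1.length = n := by rw [hp1, PySem.List.length_pySetD, hlen]
      have H : ∀ j, InR n j → fOf p1 j = if j = na then f (f na) else f j := by
        intro j hj
        rw [hp1']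
        unfold fOf
        rw [get_set parent na j v hnaR.1 (by rw [hlen]; exact_mod_cast hnaR.2) hj.1 (by rw [hlen]; exact_mod_cast hj.2)]
        rw [hvval]
        rfl
      have hx1 : PySem.List.pyGetD p1 x 0 = f (f na) := by
        by_cases hneg : x < 0
        · rw [pyGetD_neg' p1 x 0 (by rw [hlen1]; exact_mod_cast hx0) hneg, hlen1]
          have : x + (n:Int) = na := by rw [hna]; unfold normN; rw [if_pos hneg]
          rw [this]
          have := H na hnaR
          unfold fOf at this
          rw [this, if_pos rfl]
        · have hnax : na = x := by rw [hna]; exact normN_nonneg n x (by omega)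
          have := H na hnaR
          unfold fOf at this
          rw [← hnax, this, if_pos rfl]
      have hffR : InR n (f (f na)) := (hF (f na) hpxR).1
      have hF1 : Forest n (fOf p1) hgt := forest_halve n f (fOf p1) hgt na hF hnaR hroot H
      have hfix1 := fix_halve n f (fOf p1) hgt na hF hnaR hroot H
      have hroot1 := root_halve n f (fOf p1) hgt na hF hnaR hroot H hG
      have hd : hgt (f (f na)) < hgt na := hgt_ffx n f hgt na hF hnaR hroot
      rw [hx1]
      obtain ⟨parent', heq, hlen', hF', hfix', hroot'⟩ :=
        ih p1 (f (f na)) hlen1 hF1 hG ⟨by have := hffR.1; omega, hffR.2⟩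
          (by rw [normN_nonneg n _ hffR.1]; omega)
      refine ⟨parent', ?_, hlen', hF', ?_, ?_⟩
      · rw [heq]
        congr 1
        rw [normN_nonneg n _ hffR.1]
        rw [hroot1 (f (f na)) hffR]
        rw [← root_step n f hgt hF hG (f na) hpxR]
        rw [← root_step n f hgt hF hG na hnaR]
      · intro j hj
        rw [hfix' j hj, hfix1 j hj]
      · intro j hj
        rw [hroot' j hj, hroot1 j hj]

-- ---- union specification ----

lemma normN_InR (n : Nat) (x : Int) (h : PySem.Raise.InRange n x) : InR n (normN n x) := by
  obtain ⟨h0, h1⟩ := h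
  unfold normN; split_ifs <;> exact ⟨by omega, by omega⟩

lemma nodup_rngL (n : Nat) : (rngL n).Nodup := by
  unfold rngL
  exact (List.nodup_range).map (fun a b h => by exact_mod_cast h)

lemma dsuUnion_spec (n : Nat) (parent size : List Int) (c a b : Int) (hgt : Int → Nat)
    (hlen : parent.length = n) (hF : Forest n (fOf parent) hgt) (hB : Bnd n (fOf parent) hgt)
    (ha : PySem.Raise.InRange n a) (hb : PySem.Raise.InRange n b) :
    ∃ hgt2,
      (dsuUnion parent size c a b).1.length = n ∧
      Forest n (fOf (dsuUnion parent size c a b).1) hgt2 ∧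
      Bnd n (fOf (dsuUnion parent size c a b).1) hgt2 ∧
      (dsuUnion parent size c a b).2.2.1 =
        (if rootN n (fOf parent) (normN n a) = rootN n (fOf parent) (normN n b) then c else c - 1) ∧
      (dsuUnion parent size c a b).2.2.2 =
        (if rootN n (fOf parent) (normN n a) = rootN n (fOf parent) (normN n b) then false else true) ∧
      (if rootN n (fOf parent) (normN n a) = rootN n (fOf parent) (normN n b)
       then ∀ j, InR n j → rootN n (fOf (dsuUnion parent size c a b).1) j = rootN n (fOf parent) j
       else ∃ s, (s = rootN n (fOf parent) (normN n a) ∨ s = rootN n (fOf parent) (normN n b)) ∧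
         ∀ j, InR n j → rootN n (fOf (dsuUnion parent size c a b).1) j =
           if rootN n (fOf parent) j = rootN n (fOf parent) (normN n a) ∨
              rootN n (fOf parent) j = rootN n (fOf parent) (normN n b)
           then s else rootN n (fOf parent) j) := by
  obtain ⟨ha0, ha1⟩ := ha
  obtain ⟨hb0, hb1⟩ := hb
  have hn : 1 ≤ n := by omega
  set f := fOf parent with hfdef
  have hG : ∀ j, InR n j → hgt j < 2 ^ n := bnd_global n f hgt hF hB hn
  have hroots1 : 1 ≤ nrootsF n f := nroots_pos n f hgt hF hn
  have hrootsle : nrootsF n f ≤ n := nroots_le n f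
  have hfuelBound : ∀ j, InR n j → hgt j + 2 ≤ 2 ^ n := by
    intro j hj
    have h1 := hB j hj
    have h2 : 2 ^ (n - nrootsF n f) ≤ 2 ^ (n - 1) :=
      Nat.pow_le_pow_right (by norm_num) (by omega)
    have h3 : 2 ^ (n - 1) * 2 = 2 ^ n := by
      rw [← pow_succ]; congr 1; omega
    have h4 : 1 ≤ 2 ^ (n - 1) := Nat.one_le_two_pow
    omega
  have hnaR := normN_InR n a ⟨ha0, ha1⟩
  have hnbR := normN_InR n b ⟨hb0, hb1⟩
  obtain ⟨p1, he1, hlen1, hF1, hfix1, hroot1⟩ :=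
    findLoop_spec n hgt (2 ^ parent.length) parent a hlen hF hG ⟨ha0, ha1⟩
      (by rw [hlen]; exact hfuelBound _ hnaR)
  obtain ⟨p2, he2, hlen2, hF2, hfix2, hroot2⟩ :=
    findLoop_spec n hgt (2 ^ p1.length) p1 b hlen1 hF1 hG ⟨hb0, hb1⟩
      (by rw [hlen1]; exact hfuelBound _ hnbR)
  set ra := rootN n f (normN n a) with hradef
  set rb := rootN n f (normN n b) with hrbdef
  have hrb1 : rootN n (fOf p1) (normN n b) = rb := hroot1 _ hnbR
  -- properties of ra, rb
  obtain ⟨hfra, hraR⟩ := root_fixed_self n f hgt hF hG (normN n a) hnaR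
  obtain ⟨hfrb, hrbR⟩ := root_fixed_self n f hgt hF hG (normN n b) hnbR
  have hfix12 : ∀ j, InR n j → (fOf p2 j = j ↔ f j = j) := by
    intro j hj; rw [hfix2 j hj, hfix1 j hj]
  have hroot12 : ∀ j, InR n j → rootN n (fOf p2) j = rootN n f j := by
    intro j hj; rw [hroot2 j hj, hroot1 j hj]
  have hnr12 : nrootsF n (fOf p2) = nrootsF n f := nroots_congr n f (fOf p2) hfix12
  have hB2 : Bnd n (fOf p2) hgt := by
    intro j hj; rw [hnr12]; exact hB j hj
  by_cases hrr : ra = rb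
  · -- no merge
    have hu : dsuUnion parent size c a b = (p2, size, c, false) := by
      simp [dsuUnion, he1, hrb1, he2, hrr]
    rw [hu]
    refine ⟨hgt, hlen2, hF2, hB2, by rw [if_pos hrr], by rw [if_pos hrr], ?_⟩
    rw [if_pos hrr]
    exact hroot12
  · -- merge: parent[rb'] := ra' for the size-chosen orientation (ra', rb')
    have hne12 : normN n a ≠ normN n b := by
      intro h; apply hrr; rw [hradef, hrbdef, h]
    have hf2ra : fOf p2 ra = ra := (hfix12 ra hraR).mpr hfra
    have hf2rb : fOf p2 rb = rb := (hfix12 rb hrbR).mpr hfrb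
    have key : ∀ ra' rb' : Int, (ra' = ra ∧ rb' = rb) ∨ (ra' = rb ∧ rb' = ra) →
        ∃ hgt2, (PySem.List.pySetD p2 rb' ra').length = n ∧
          Forest n (fOf (PySem.List.pySetD p2 rb' ra')) hgt2 ∧
          Bnd n (fOf (PySem.List.pySetD p2 rb' ra')) hgt2 ∧
          ∀ j, InR n j → rootN n (fOf (PySem.List.pySetD p2 rb' ra')) j =
            if rootN n f j = ra ∨ rootN n f j = rb then ra' else rootN n f j := by
      intro ra' rb' hor
      have hra'R : InR n ra' := by rcases hor with ⟨h1, _⟩ | ⟨h1, _⟩ <;> rw [h1] <;> [exact hraR; exact hrbR]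
      have hrb'R : InR n rb' := by rcases hor with ⟨_, h2⟩ | ⟨_, h2⟩ <;> rw [h2] <;> [exact hrbR; exact hraR]
      have hf2ra' : fOf p2 ra' = ra' := by rcases hor with ⟨h1, _⟩ | ⟨h1, _⟩ <;> rw [h1] <;> [exact hf2ra; exact hf2rb]
      have hf2rb' : fOf p2 rb' = rb' := by rcases hor with ⟨_, h2⟩ | ⟨_, h2⟩ <;> rw [h2] <;> [exact hf2rb; exact hf2ra]
      have hne' : ra' ≠ rb' := by
        rcases hor with ⟨h1, h2⟩ | ⟨h1, h2⟩ <;> rw [h1, h2]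
        · exact hrr
        · exact fun h => hrr h.symm
      set p3 := PySem.List.pySetD p2 rb' ra' with hp3
      have hlen3 : p3.length = n := by rw [hp3, PySem.List.length_pySetD, hlen2]
      have H : ∀ j, InR n j → fOf p3 j = if j = rb' then ra' else fOf p2 j := by
        intro j hj
        rw [hp3]
        unfold fOf
        exact get_set p2 rb' j ra' hrb'R.1 (by rw [hlen2]; exact_mod_cast hrb'R.2) hj.1
          (by rw [hlen2]; exact_mod_cast hj.2)
      have hFU := forest_union n (fOf p2) (fOf p3) hgt ra' rb' hF2 hG hra'R hrb'R hf2ra' hf2rb' hne' H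
      set e := n - nrootsF n f with hedef
      have harith : n - (nrootsF n f - 1) = e + 1 := by omega
      have hb2G : ∀ j, InR n j → (if rootN n (fOf p2) j = rb' then hgt j + hgt ra' + 1 else hgt j) < 2 ^ (e + 1) := by
        intro j hj
        have h1 := hB2 j hj
        have h2 := hB2 ra' hra'R
        rw [hnr12, ← hedef] at h1 h2
        have h3 : 2 ^ e + 2 ^ e = 2 ^ (e + 1) := by rw [pow_succ]; omega
        split_ifs <;> omega
      have hexp : 2 ^ (e + 1) ≤ 2 ^ n := Nat.pow_le_pow_right (by norm_num) (by omega)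
      have hb2G' : ∀ j, InR n j → (if rootN n (fOf p2) j = rb' then hgt j + hgt ra' + 1 else hgt j) < 2 ^ n := by
        intro j hj
        exact lt_of_lt_of_le (hb2G j hj) hexp
      have hRU := root_union n (fOf p2) (fOf p3) hgt ra' rb' hF2 hG hra'R hrb'R hf2ra' hf2rb' hne' H hb2G'
      have hFixU := fix_union n (fOf p2) (fOf p3) ra' rb' hf2rb' hne' H
      have hcnt : nrootsF n (fOf p2) = nrootsF n (fOf p3) + 1 := by
        apply countP_update (rngL n) _ _ rb' ((mem_rngL n rb').mpr hrb'R) (nodup_rngL n)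
        · simp [hf2rb']
        · have := (H rb' hrb'R)
          rw [if_pos rfl] at this
          simp [this]
          exact fun h => hne' h
        · intro y hy hyne
          have hyR := (mem_rngL n y).mp hy
          have := H y hyR
          rw [if_neg hyne] at this
          simp [this]
      have hnr3 : nrootsF n (fOf p3) = nrootsF n f - 1 := by omega
      refine ⟨fun j => if rootN n (fOf p2) j = rb' then hgt j + hgt ra' + 1 else hgt j,
        hlen3, hFU, ?_, ?_⟩
      · intro j hj
        rw [hnr3, harith]
        exact hb2G j hj
      · intro j hj
        rw [hRU j hj, hroot12 j hj]
        rcases hor with ⟨h1, h2⟩ | ⟨h1, h2⟩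
        · rw [h1, h2]
          by_cases w : rootN n f j = rb
          · rw [if_pos w, if_pos (Or.inr w)]
          · rw [if_neg w]
            by_cases w2 : rootN n f j = ra
            · rw [if_pos (Or.inl w2), w2]
            · rw [if_neg (by tauto)]
        · rw [h1, h2]
          by_cases w : rootN n f j = ra
          · rw [if_pos w, if_pos (Or.inl w)]
          · rw [if_neg w]
            by_cases w2 : rootN n f j = rb
            · rw [if_pos (Or.inr w2), w2]
            · rw [if_neg (by tauto)]
    by_cases hsw : PySem.List.pyGetD size ra 0 < PySem.List.pyGetD size rb 0
    · have hpr : dsuUnion parent size c a b =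
          (PySem.List.pySetD p2 ra rb, PySem.List.pySetD size rb (PySem.List.pyGetD size rb 0 + PySem.List.pyGetD size ra 0), c - 1, true) := by
        simp [dsuUnion, he1, hrb1, he2, hrr, hsw]
      rw [hpr]
      obtain ⟨hgt2, k1, k2, k3, k4⟩ := key rb ra (Or.inr ⟨rfl, rfl⟩)
      refine ⟨hgt2, k1, k2, k3, by rw [if_neg hrr], by rw [if_neg hrr], ?_⟩
      rw [if_neg hrr]
      exact ⟨rb, Or.inr rfl, k4⟩
    · have hpr : dsuUnion parent size c a b =
          (PySem.List.pySetD p2 rb ra, PySem.List.pySetD size ra (PySem.List.pyGetD size ra 0 + PySem.List.pyGetD size rb 0), c - 1, true) := by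
        simp [dsuUnion, he1, hrb1, he2, hrr, hsw]
      rw [hpr]
      obtain ⟨hgt2, k1, k2, k3, k4⟩ := key ra rb (Or.inl ⟨rfl, rfl⟩)
      refine ⟨hgt2, k1, k2, k3, by rw [if_neg hrr], by rw [if_neg hrr], ?_⟩
      rw [if_neg hrr]
      exact ⟨ra, Or.inl rfl, k4⟩

-- ---- merging two classes: the collapsed-partition characterisation ----

lemma collapse_iff (g : Int → Int) (p q s : Int) (hs : s = p ∨ s = q) (i j : Int) :
    ((if g i = p ∨ g i = q then s else g i) = (if g j = p ∨ g j = q then s else g j)) ↔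
      (g i = g j ∨ ((g i = p ∨ g i = q) ∧ (g j = p ∨ g j = q))) := by
  by_cases hi : g i = p ∨ g i = q <;> by_cases hj : g j = p ∨ g j = q
  · rw [if_pos hi, if_pos hj]
    constructor
    · intro _; exact Or.inr ⟨hi, hj⟩
    · intro _; rfl
  · rw [if_pos hi, if_neg hj]
    constructor
    · intro h; exfalso; apply hj; rw [← h]; exact hs
    · intro h
      rcases h with h | h
      · exfalso; apply hj; rw [← h]; exact hi
      · exact absurd h.2 hj
  · rw [if_neg hi, if_pos hj]
    constructor
    · intro h; exfalso; apply hi; rw [h]; exact hs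
    · intro h
      rcases h with h | h
      · exfalso; apply hi; rw [h]; exact hj
      · exact absurd h.1 hi
  · rw [if_neg hi, if_neg hj]
    constructor
    · intro h; exact Or.inl h
    · intro h
      rcases h with h | h
      · exact h
      · exact absurd h.1 hi

-- ---- the main loop simulation ----

lemma pyGetD_norm (xs : List Int) (x : Int) (n : Nat) (hlen : xs.length = n)
    (hx : PySem.Raise.InRange n x) : PySem.List.pyGetD xs x 0 = fOf xs (normN n x) := by
  unfold fOf normN
  split_ifs with h
  · rw [pyGetD_neg' xs x 0 (by rw [hlen]; exact_mod_cast hx.1) h, hlen]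
  · rfl

lemma map_get (labels : List Int) (g : Int → Int) (i : Int) (hi0 : 0 ≤ i) (hi1 : i < labels.length) :
    fOf (labels.map g) i = g (fOf labels i) := by
  unfold fOf
  rw [PySem.List.pyGetD_eq_getElem _ _ hi0 (by simpa using hi1),
    PySem.List.pyGetD_eq_getElem _ _ hi0 hi1, List.getElem_map]

lemma loop_eq (points : List (Int × Int × Int)) :
    ∀ (edges : List (Int × Int × Int)) (parent size labels : List Int) (c last : Int) (hgt : Int → Nat),
      parent.length = points.length → labels.length = points.length →
      Forest points.length (fOf parent) hgt → Bnd points.length (fOf parent) hgt →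
      MatchP points.length (fOf parent) (fOf labels) →
      (∀ e ∈ edges, PySem.Raise.InRange points.length e.2.1 ∧ PySem.Raise.InRange points.length e.2.2) →
      part2Loop points edges parent size c last = part2AltLoop points edges labels c last := by
  intro edges
  induction edges with
  | nil => intro parent size labels c last hgt _ _ _ _ _ _; rfl
  | cons e rest ih =>
    intro parent size labels c last hgt hlenP hlenL hF hB hM hpre
    set n := points.length with hn
    have ha := (hpre e List.mem_cons_self).1
    have hb := (hpre e List.mem_cons_self).2
    have hpre' : ∀ e' ∈ rest, PySem.Raise.InRange n e'.2.1 ∧ PySem.Raise.InRange n e'.2.2 :=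
      fun e' he' => hpre e' (List.mem_cons_of_mem _ he')
    obtain ⟨hgt2, k1, k2, k3, kc, kb, kroots⟩ := dsuUnion_spec n parent size c e.2.1 e.2.2 hgt hlenP hF hB ha hb
    set f := fOf parent with hfdef
    set na := normN n e.2.1 with hnadef
    set nb := normN n e.2.2 with hnbdef
    have hnaR := normN_InR n e.2.1 ha
    have hnbR := normN_InR n e.2.2 hb
    set ra := rootN n f na with hradef
    set rb := rootN n f nb with hrbdef
    set u := dsuUnion parent size c e.2.1 e.2.2 with hudef
    have hla : PySem.List.pyGetD labels e.2.1 0 = fOf labels na := pyGetD_norm labels e.2.1 n hlenL ha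
    have hlb : PySem.List.pyGetD labels e.2.2 0 = fOf labels nb := pyGetD_norm labels e.2.2 n hlenL hb
    have hMab : (fOf labels na = fOf labels nb) ↔ (ra = rb) := hM na nb hnaR hnbR
    simp only [part2Loop, part2AltLoop]
    rw [hla, hlb]
    by_cases hrr : ra = rb
    · -- the two endpoints are already connected: neither side merges
      have kb' : u.2.2.2 = false := by rw [kb, if_pos hrr]
      have kc' : u.2.2.1 = c := by rw [kc, if_pos hrr]
      rw [if_neg (by rw [kb']; simp), if_neg (not_not_intro (hMab.mpr hrr)), kc']
      rw [if_pos hrr] at kroots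
      exact ih u.1 u.2.1 labels c last hgt2 k1 hlenL k2 k3
        (fun i j hi hj => by rw [kroots i hi, kroots j hj]; exact hM i j hi hj) hpre'
    · -- merge
      have kb' : u.2.2.2 = true := by rw [kb, if_neg hrr]
      have kc' : u.2.2.1 = c - 1 := by rw [kc, if_neg hrr]
      have hlalb : fOf labels na ≠ fOf labels nb := fun h => hrr (hMab.mp h)
      rw [if_pos (by rw [kb']), if_pos hlalb, kc']
      by_cases hc1 : c - 1 = 1
      · rw [if_pos hc1, if_pos hc1]
      · rw [if_neg hc1, if_neg hc1]
        rw [if_neg hrr] at kroots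
        obtain ⟨sv, hsv, k4⟩ := kroots
        have conv : ∀ v : Int, (if v = fOf labels nb then fOf labels na else v) =
            if v = fOf labels na ∨ v = fOf labels nb then fOf labels na else v := by
          intro v
          by_cases h1 : v = fOf labels nb
          · rw [if_pos h1, if_pos (Or.inr h1)]
          · rw [if_neg h1]
            by_cases h2 : v = fOf labels na
            · rw [if_pos (Or.inl h2), h2]
            · rw [if_neg (by tauto)]
        apply ih u.1 u.2.1 (labels.map fun v => if v = fOf labels nb then fOf labels na else v)
          (c - 1) _ hgt2 k1 (by rw [List.length_map, hlenL]) k2 k3 ?_ hpre'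
        intro i j hi hj
        have hLi : fOf (labels.map fun v => if v = fOf labels nb then fOf labels na else v) i =
            if fOf labels i = fOf labels na ∨ fOf labels i = fOf labels nb then fOf labels na
            else fOf labels i := by
          rw [map_get labels _ i hi.1 (by rw [hlenL]; exact_mod_cast hi.2)]
          exact conv _
        have hLj : fOf (labels.map fun v => if v = fOf labels nb then fOf labels na else v) j =
            if fOf labels j = fOf labels na ∨ fOf labels j = fOf labels nb then fOf labels na
            else fOf labels j := by
          rw [map_get labels _ j hj.1 (by rw [hlenL]; exact_mod_cast hj.2)]
          exact conv _
        rw [hLi, hLj, k4 i hi, k4 j hj]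
        rw [collapse_iff (fOf labels) (fOf labels na) (fOf labels nb) (fOf labels na) (Or.inl rfl) i j]
        rw [collapse_iff (rootN n f) ra rb sv hsv i j]
        rw [hM i j hi hj, hM i na hi hnaR, hM i nb hi hnbR, hM j na hj hnaR, hM j nb hj hnbR]

-- ===== VERDICT (by name: the statement is the Claim_ definition above) =====
theorem part2_spec : Claim_equal_part2 := by
  unfold Claim_equal_part2
  intro points edges _hdom hpre
  unfold Spec_part2 part2 part2_alt
  apply loop_eq points edges (rngL points.length) (List.replicate points.length 1)
    (rngL points.length) (points.length : Int) 0 (fun _ => 0)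
  · simp [rngL]
  · simp [rngL]
  · intro i hi
    rw [fOf_rngL points.length i hi]
    exact ⟨hi, Or.inl rfl⟩
  · intro i _
    exact Nat.two_pow_pos _
  · intro i j hi hj
    rw [fOf_rngL points.length i hi, fOf_rngL points.length j hj]
    rw [show rootN points.length (fOf (rngL points.length)) i = i from
      ri_fixed _ _ _ (fOf_rngL points.length i hi)]
    rw [show rootN points.length (fOf (rngL points.length)) j = j from
      ri_fixed _ _ _ (fOf_rngL points.length j hj)]
  · exact hpre
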